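-- pv_equiv track=rewrite | github.com/songeunm/PS | python/codetree/hashmap/codetree_hashmap6.py | sum_of_three_numbers
-- ===== SOURCE A (Python) =====
-- from collections import defaultdict
--
-- def sum_of_three_numbers(nums, k):
--     n = len(nums)
--     result = 0
--     cnt = defaultdict(int)
--     for i in range(n):
--         calc = k - nums[i]
--         if calc in cnt:
--             result += cnt[calc]
--         for j in range(i):
--             pair_sum = nums[i] + nums[j]
--             cnt[pair_sum] += 1
--     return result
-- ===== SOURCE B (Python) =====
-- def sum_of_three_numbers(nums, k):
--     n = len(nums)
--     result = 0
--     for a in range(n):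
--         for b in range(a + 1, n):
--             for c in range(b + 1, n):
--                 if nums[a] + nums[b] + nums[c] == k:
--                     result += 1
--     return result
-- ===== Notes on version B (the rewrite author's own statement) =====
-- stated objective: simpler
-- what changed: Replaced A's incremental hashmap of pair sums (counting triples grouped by their largest index) with a direct brute-force scan of all increasing-index triples a<b<c.
import Mathlib
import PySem

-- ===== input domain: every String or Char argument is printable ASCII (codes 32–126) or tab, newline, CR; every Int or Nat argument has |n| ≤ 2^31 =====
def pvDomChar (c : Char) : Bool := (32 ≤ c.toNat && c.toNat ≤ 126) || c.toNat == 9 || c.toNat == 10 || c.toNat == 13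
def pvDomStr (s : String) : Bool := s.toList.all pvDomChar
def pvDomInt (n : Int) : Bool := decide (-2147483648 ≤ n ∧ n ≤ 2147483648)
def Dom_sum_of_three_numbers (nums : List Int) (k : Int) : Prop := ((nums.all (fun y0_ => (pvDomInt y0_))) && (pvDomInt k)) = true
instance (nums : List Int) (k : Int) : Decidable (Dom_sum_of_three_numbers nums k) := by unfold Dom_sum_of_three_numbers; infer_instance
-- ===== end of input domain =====

-- B replaces A's incremental hashmap of pair sums with a plain brute-force scan of all
-- increasing-index triples a < b < c (simpler, no hashmap; A is the faster algorithm).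

-- ===== PORT A =====
def sum_of_three_numbers (nums : List Int) (k : Int) : Int :=
  let n : Int := (nums.length : Int)
  (List.foldl
    (fun (st : Int × PySem.Dict Int Int) (i : Int) =>
      let calcv : Int := k - PySem.List.pyGetD nums i 0
      let result : Int := if st.2.contains calcv then st.1 + st.2.getD calcv 0 else st.1
      let cnt : PySem.Dict Int Int :=
        List.foldl
          (fun (d : PySem.Dict Int Int) (j : Int) =>
            d.modify (PySem.List.pyGetD nums i 0 + PySem.List.pyGetD nums j 0) 0 (· + 1))
          st.2 (PySem.List.pyRange 0 i 1)
      (result, cnt))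
    (0, (PySem.Dict.empty : PySem.Dict Int Int)) (PySem.List.pyRange 0 n 1)).1

-- ===== PORT B =====
def sum_of_three_numbers_alt (nums : List Int) (k : Int) : Int :=
  let n : Int := (nums.length : Int)
  List.foldl
    (fun (r : Int) (a : Int) =>
      List.foldl
        (fun (r : Int) (b : Int) =>
          List.foldl
            (fun (r : Int) (c : Int) =>
              if PySem.List.pyGetD nums a 0 + PySem.List.pyGetD nums b 0 + PySem.List.pyGetD nums c 0 = k
              then r + 1 else r)
            r (PySem.List.pyRange (b + 1) n 1))
        r (PySem.List.pyRange (a + 1) n 1))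
    0 (PySem.List.pyRange 0 n 1)

-- ===== PRECONDITION & SPEC =====
def Spec_sum_of_three_numbers (nums : List Int) (k : Int) (out : Int) : Prop := out = sum_of_three_numbers_alt nums k
instance (nums : List Int) (k : Int) (out : Int) : Decidable (Spec_sum_of_three_numbers nums k out) := by unfold Spec_sum_of_three_numbers; infer_instance

-- ===== CLAIM (what is proved, stated in full; the proofs are below) =====
def Claim_equal_sum_of_three_numbers : Prop := ∀ (nums : List Int) (k : Int), Dom_sum_of_three_numbers nums k → Spec_sum_of_three_numbers nums k (sum_of_three_numbers nums k)

-- ===== LEMMAS AND PROOFS =====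

-- nums[t] for an in-range Nat index (both programs only index with such)
def pvG (nums : List Int) (t : Nat) : Int := nums.getD t 0

-- the multiset of pair sums A's hashmap holds after the first m outer iterations
def pvPairs (nums : List Int) (m : Nat) : List Int :=
  (List.range m).flatMap (fun b => (List.range b).map (fun a => pvG nums b + pvG nums a))

-- A's running result after the first m outer iterations
def pvRes (nums : List Int) (k : Int) (m : Nat) : Int :=
  ∑ c ∈ Finset.range m, ((pvPairs nums c).count (k - pvG nums c) : Int)

-- List.range sum bridged to a Finset.range sum
theorem pv_sum_map_range (f : Nat → Int) (n : Nat) :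
    ((List.range n).map f).sum = ∑ i ∈ Finset.range n, f i := by
  induction n with
  | zero => simp
  | succ n ih => rw [List.range_succ, List.map_append, List.sum_append, Finset.sum_range_succ, ih]; simp

-- a fold over pyRange s n accumulating r + g t is a Finset.Ico sum
theorem pvFoldIco (s n : Nat) (f : Int → Int → Int) (g : Nat → Int)
    (h : ∀ (r : Int) (t : Nat), f r (t : Int) = r + g t) (r : Int) :
    List.foldl f r (PySem.List.pyRange (s : Int) (n : Int) 1) = r + ∑ t ∈ Finset.Ico s n, g t := by
  rw [PySem.List.pyRange_one, List.foldl_map,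
      show (((n : Int) - (s : Int)).toNat) = n - s by omega,
      PySem.List.foldl_congr_mem' _ _ (fun r k => r + g (s + k)) r
        (by intro x _ acc
            rw [show ((s : Int) + (x : Int)) = ((s + x : Nat) : Int) by push_cast; ring, h]),
      PySem.List.foldl_add, pv_sum_map_range, Finset.sum_Ico_eq_sum_range]

-- counting a value in a mapped range, as a Finset sum
theorem pvCountRange (g : Nat → Int) (m : Nat) (x : Int) :
    (((List.range m).map g).count x : Int) = ∑ a ∈ Finset.range m, (if g a = x then (1 : Int) else 0) := by
  induction m with
  | zero => simp
  | succ m ih =>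
    rw [List.range_succ, List.map_append, List.count_append, Finset.sum_range_succ, ← ih]
    by_cases h : g m = x <;> simp [h]

-- the count A reads off its hashmap, as a double Finset sum
theorem pvCountPairs (nums : List Int) (m : Nat) (x : Int) :
    ((pvPairs nums m).count x : Int)
      = ∑ b ∈ Finset.range m, ∑ a ∈ Finset.range b, (if pvG nums b + pvG nums a = x then (1 : Int) else 0) := by
  induction m with
  | zero => simp [pvPairs]
  | succ m ih =>
    rw [show pvPairs nums (m + 1)
          = pvPairs nums m ++ (List.range m).map (fun a => pvG nums m + pvG nums a) by
        unfold pvPairs; rw [List.range_succ, List.flatMap_append]; simp,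
      List.count_append, Finset.sum_range_succ, ← ih, ← pvCountRange]
    push_cast; ring

-- A's defaultdict read: the contains-guarded lookup is just the count
theorem pvCountStep (P : List Int) (r x : Int) :
    (if (PySem.Dict.counter P).contains x then r + (PySem.Dict.counter P).getD x 0 else r)
      = r + (P.count x : Int) := by
  rw [PySem.Dict.contains_counter, PySem.Dict.getD_counter]
  by_cases hx : x ∈ P
  · simp [hx]
  · simp [hx, List.count_eq_zero.mpr hx]

-- A's inner loop extends the counter by the new block of pair sums
theorem pvCntStep (nums : List Int) (P : List Int) (m : Nat) :
    List.foldl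
        (fun (d : PySem.Dict Int Int) (j : Int) =>
          d.modify (PySem.List.pyGetD nums (m : Int) 0 + PySem.List.pyGetD nums j 0) 0 (· + 1))
        (PySem.Dict.counter P) (PySem.List.pyRange 0 (m : Int) 1)
      = PySem.Dict.counter (P ++ (List.range m).map (fun a => pvG nums m + pvG nums a)) := by
  rw [PySem.Dict.counter_eq_foldl, PySem.Dict.counter_eq_foldl, List.foldl_append,
      PySem.List.pyRange_zero_nat, List.foldl_map, List.foldl_map]
  apply PySem.List.foldl_congr_mem'
  intro a _ acc
  simp [PySem.List.pyGetD_natCast, pvG]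

-- loop invariant of A's outer loop
theorem pvA_state (nums : List Int) (k : Int) (m : Nat) :
    List.foldl
        (fun (st : Int × PySem.Dict Int Int) (i : Int) =>
          let calcv : Int := k - PySem.List.pyGetD nums i 0
          let result : Int := if st.2.contains calcv then st.1 + st.2.getD calcv 0 else st.1
          let cnt : PySem.Dict Int Int :=
            List.foldl
              (fun (d : PySem.Dict Int Int) (j : Int) =>
                d.modify (PySem.List.pyGetD nums i 0 + PySem.List.pyGetD nums j 0) 0 (· + 1))
              st.2 (PySem.List.pyRange 0 i 1)
          (result, cnt))
        (0, (PySem.Dict.empty : PySem.Dict Int Int)) (PySem.List.pyRange 0 (m : Int) 1)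
      = (pvRes nums k m, PySem.Dict.counter (pvPairs nums m)) := by
  induction m with
  | zero =>
    simp [PySem.List.pyRange_one, pvRes, pvPairs, PySem.Dict.counter_eq_foldl]
  | succ m ih =>
    rw [show ((m + 1 : Nat) : Int) = (m : Int) + 1 by push_cast; ring,
        PySem.List.pyRange_one_succ_right (by positivity), List.foldl_append, ih]
    simp only [List.foldl_cons, List.foldl_nil]
    rw [pvCntStep]
    have hres : pvRes nums k (m + 1)
        = pvRes nums k m + ((pvPairs nums m).count (k - pvG nums m) : Int) := by
      unfold pvRes; rw [Finset.sum_range_succ]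
    have hpairs : pvPairs nums (m + 1)
        = pvPairs nums m ++ (List.range m).map (fun a => pvG nums m + pvG nums a) := by
      unfold pvPairs; rw [List.range_succ, List.flatMap_append]; simp
    rw [hres, hpairs]
    simp only [PySem.List.pyGetD_natCast]
    rw [← pvCountStep (pvPairs nums m) (pvRes nums k m) (k - pvG nums m)]
    simp [pvG]

-- A computes the triple sum grouped by the largest index
theorem pvA_eq (nums : List Int) (k : Int) :
    sum_of_three_numbers nums k
      = ∑ c ∈ Finset.range nums.length, ∑ b ∈ Finset.range c, ∑ a ∈ Finset.range b,
          (if pvG nums a + pvG nums b + pvG nums c = k then (1 : Int) else 0) := by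
  simp only [sum_of_three_numbers]
  rw [pvA_state nums k nums.length]
  show pvRes nums k nums.length = _
  unfold pvRes
  refine Finset.sum_congr rfl (fun c _ => ?_)
  rw [pvCountPairs]
  refine Finset.sum_congr rfl (fun b _ => Finset.sum_congr rfl (fun a _ => ?_))
  exact if_congr (by constructor <;> intro h <;> omega) rfl rfl

-- B computes the triple sum grouped by the smallest index
theorem pvB_eq (nums : List Int) (k : Int) :
    sum_of_three_numbers_alt nums k
      = ∑ a ∈ Finset.range nums.length, ∑ b ∈ Finset.Ico (a + 1) nums.length,
          ∑ c ∈ Finset.Ico (b + 1) nums.length,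
            (if pvG nums a + pvG nums b + pvG nums c = k then (1 : Int) else 0) := by
  unfold sum_of_three_numbers_alt
  have h3 : ∀ (a b : Nat) (r : Int) (t : Nat),
      (if PySem.List.pyGetD nums (a : Int) 0 + PySem.List.pyGetD nums (b : Int) 0
            + PySem.List.pyGetD nums (t : Int) 0 = k then r + 1 else r)
        = r + (if pvG nums a + pvG nums b + pvG nums t = k then (1 : Int) else 0) := by
    intro a b r t
    simp only [PySem.List.pyGetD_natCast, pvG]
    split_ifs <;> simp
  have h2 : ∀ (a : Nat) (r : Int) (t : Nat),
      List.foldl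
          (fun (r : Int) (c : Int) =>
            if PySem.List.pyGetD nums (a : Int) 0 + PySem.List.pyGetD nums (t : Int) 0
                + PySem.List.pyGetD nums c 0 = k then r + 1 else r)
          r (PySem.List.pyRange ((t : Int) + 1) (nums.length : Int) 1)
        = r + ∑ c ∈ Finset.Ico (t + 1) nums.length,
            (if pvG nums a + pvG nums t + pvG nums c = k then (1 : Int) else 0) := by
    intro a r t
    rw [show ((t : Int) + 1) = ((t + 1 : Nat) : Int) by push_cast; ring]
    exact pvFoldIco (t + 1) nums.length _ _ (h3 a t) r
  have h1 : ∀ (r : Int) (t : Nat),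
      List.foldl
          (fun (r : Int) (b : Int) =>
            List.foldl
              (fun (r : Int) (c : Int) =>
                if PySem.List.pyGetD nums (t : Int) 0 + PySem.List.pyGetD nums b 0
                    + PySem.List.pyGetD nums c 0 = k then r + 1 else r)
              r (PySem.List.pyRange (b + 1) (nums.length : Int) 1))
          r (PySem.List.pyRange ((t : Int) + 1) (nums.length : Int) 1)
        = r + ∑ b ∈ Finset.Ico (t + 1) nums.length, ∑ c ∈ Finset.Ico (b + 1) nums.length,
            (if pvG nums t + pvG nums b + pvG nums c = k then (1 : Int) else 0) := by
    intro r t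
    rw [show ((t : Int) + 1) = ((t + 1 : Nat) : Int) by push_cast; ring]
    exact pvFoldIco (t + 1) nums.length _ _ (h2 t) r
  have h0 := pvFoldIco 0 nums.length
      (fun (r : Int) (a : Int) =>
        List.foldl
          (fun (r : Int) (b : Int) =>
            List.foldl
              (fun (r : Int) (c : Int) =>
                if PySem.List.pyGetD nums a 0 + PySem.List.pyGetD nums b 0
                    + PySem.List.pyGetD nums c 0 = k then r + 1 else r)
              r (PySem.List.pyRange (b + 1) (nums.length : Int) 1))
          r (PySem.List.pyRange (a + 1) (nums.length : Int) 1))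
      (fun t => ∑ b ∈ Finset.Ico (t + 1) nums.length, ∑ c ∈ Finset.Ico (b + 1) nums.length,
        (if pvG nums t + pvG nums b + pvG nums c = k then (1 : Int) else 0))
      h1 0
  simp only [Nat.cast_zero] at h0
  rw [h0, Finset.range_eq_Ico]
  simp

-- regrouping: summing over triples a < b < c by smallest index equals summing by largest
theorem pvSwap (n : Nat) (F : Nat → Nat → Nat → Int) :
    (∑ a ∈ Finset.range n, ∑ b ∈ Finset.Ico (a + 1) n, ∑ c ∈ Finset.Ico (b + 1) n, F a b c)
      = ∑ c ∈ Finset.range n, ∑ b ∈ Finset.range c, ∑ a ∈ Finset.range b, F a b c := by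
  rw [Finset.range_eq_Ico, Finset.sum_Ico_Ico_comm']
  have hswap : ∀ b ∈ Finset.Ico 0 n,
      (∑ a ∈ Finset.Ico 0 b, ∑ c ∈ Finset.Ico (b + 1) n, F a b c)
        = ∑ c ∈ Finset.Ico (b + 1) n, ∑ a ∈ Finset.Ico 0 b, F a b c := by
    intro b _; exact Finset.sum_comm
  rw [Finset.sum_congr rfl hswap, Finset.sum_Ico_Ico_comm']

-- ===== VERDICT (by name: the statement is the Claim_ definition above) =====
theorem sum_of_three_numbers_spec : Claim_equal_sum_of_three_numbers := by
  intro nums k _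
  unfold Spec_sum_of_three_numbers
  rw [pvA_eq, pvB_eq, pvSwap]
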